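-- pv_equiv track=rewrite | github.com/Finbear2/TTRGP-Helper | Main.py | Create_Saving_Rolls
-- ===== SOURCE A (Python) =====
-- def Create_Saving_Rolls( Strength, Dexterity, Constitution, Intelligence, Wisdom, Charisma, Class, Prof_Bonus):
--
--     if any( c in Class for c in ["Barbarian","Fighter"] ):
--         Strength += Prof_Bonus; Dexterity += Prof_Bonus
--     elif any( c in Class for c in ["Bard", "Rogue"] ):
--         Dexterity += Prof_Bonus; Charisma += Prof_Bonus
--     elif any( c in Class for c in ["Cleric", "Paladin", "Warlock"] ):
--         Wisdom += Prof_Bonus; Charisma += Prof_Bonus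
--     elif any( c in Class for c in ["Druid", "Wizard"] ):
--         Intelligence += Prof_Bonus; Wisdom += Prof_Bonus
--     elif any( c in Class for c in ["Monk", "Ranger"] ):
--         Dexterity += Prof_Bonus; Wisdom += Prof_Bonus
--     else:
--         Strength += Prof_Bonus; Constitution += Prof_Bonus
--
--     return {
--         "Strength": Strength,
--         "Dexterity": Dexterity,
--         "Constitution": Constitution,
--         "Intelligence": Intelligence,
--         "Wisdom": Wisdom,
--         "Charisma": Charisma
--     }
-- ===== SOURCE B (Python) =====
-- # Different algorithm: instead of a first-match if/elif chain mutating stats,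
-- # rank every matching class name by group priority, take the MINIMUM priority
-- # (default group 5), and build the result dict in one comprehension that adds
-- # Prof_Bonus exactly to the stats belonging to the chosen group.
-- _PRIO = {
--     "Barbarian": 0, "Fighter": 0,
--     "Bard": 1, "Rogue": 1,
--     "Cleric": 2, "Paladin": 2, "Warlock": 2,
--     "Druid": 3, "Wizard": 3,
--     "Monk": 4, "Ranger": 4,
-- }
-- _SAVES = [("Strength", "Dexterity"), ("Dexterity", "Charisma"),
--           ("Wisdom", "Charisma"), ("Intelligence", "Wisdom"),
--           ("Dexterity", "Wisdom"), ("Strength", "Constitution")]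
--
-- def Create_Saving_Rolls(Strength, Dexterity, Constitution, Intelligence, Wisdom, Charisma, Class, Prof_Bonus):
--     saves = _SAVES[min((g for n, g in _PRIO.items() if n in Class), default=5)]
--     base = [("Strength", Strength), ("Dexterity", Dexterity),
--             ("Constitution", Constitution), ("Intelligence", Intelligence),
--             ("Wisdom", Wisdom), ("Charisma", Charisma)]
--     return {k: v + (Prof_Bonus if k in saves else 0) for k, v in base}
-- ===== Notes on version B (the rewrite author's own statement) =====
-- stated objective: alternative
-- what changed: Replaces the first-match if/elif chain over groups that mutates six variables by a min-over-priorities computation: every class name carries a priority, the minimum priority among all names occurring in Class (default 5) selects the save pair, and the result dict is built in one comprehension adding Prof_Bonus where the key is in that pair.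
import Mathlib
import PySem

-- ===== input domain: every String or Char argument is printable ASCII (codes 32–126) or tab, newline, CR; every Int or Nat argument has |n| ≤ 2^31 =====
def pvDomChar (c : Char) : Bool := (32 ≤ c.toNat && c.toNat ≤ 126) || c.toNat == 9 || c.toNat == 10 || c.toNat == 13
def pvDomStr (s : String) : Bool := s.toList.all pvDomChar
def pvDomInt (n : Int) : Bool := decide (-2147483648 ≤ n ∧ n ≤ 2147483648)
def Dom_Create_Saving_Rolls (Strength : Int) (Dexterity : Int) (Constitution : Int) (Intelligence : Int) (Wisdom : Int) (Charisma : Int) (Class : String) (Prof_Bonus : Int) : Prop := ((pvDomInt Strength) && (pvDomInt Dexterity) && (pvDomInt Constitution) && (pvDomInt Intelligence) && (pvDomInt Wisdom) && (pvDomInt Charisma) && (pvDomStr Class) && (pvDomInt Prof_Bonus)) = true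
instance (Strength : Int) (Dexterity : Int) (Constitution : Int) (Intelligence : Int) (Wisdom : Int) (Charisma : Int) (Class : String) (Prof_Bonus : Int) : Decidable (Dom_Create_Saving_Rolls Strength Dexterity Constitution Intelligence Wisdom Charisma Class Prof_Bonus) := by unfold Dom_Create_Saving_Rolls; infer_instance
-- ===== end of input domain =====

-- B replaces the first-match if/elif chain by a min-over-priorities selection and a
-- per-key comprehension adding the bonus; objective: alternative decomposition.
-- ===== PORT A =====
-- any(c in Class for c in names)  (exact: PySem.Str.isIn is Python's substring 'in')
def anyIn (names : List String) (Class : String) : Bool :=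
  names.any (fun c => PySem.Str.isIn c Class)

def Create_Saving_Rolls (Strength : Int) (Dexterity : Int) (Constitution : Int) (Intelligence : Int) (Wisdom : Int) (Charisma : Int) (Class : String) (Prof_Bonus : Int) : List (String × Int) :=
  let (Strength, Dexterity, Constitution, Intelligence, Wisdom, Charisma) :=
    if anyIn ["Barbarian", "Fighter"] Class then
      (Strength + Prof_Bonus, Dexterity + Prof_Bonus, Constitution, Intelligence, Wisdom, Charisma)
    else if anyIn ["Bard", "Rogue"] Class then
      (Strength, Dexterity + Prof_Bonus, Constitution, Intelligence, Wisdom, Charisma + Prof_Bonus)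
    else if anyIn ["Cleric", "Paladin", "Warlock"] Class then
      (Strength, Dexterity, Constitution, Intelligence, Wisdom + Prof_Bonus, Charisma + Prof_Bonus)
    else if anyIn ["Druid", "Wizard"] Class then
      (Strength, Dexterity, Constitution, Intelligence + Prof_Bonus, Wisdom + Prof_Bonus, Charisma)
    else if anyIn ["Monk", "Ranger"] Class then
      (Strength, Dexterity + Prof_Bonus, Constitution, Intelligence, Wisdom + Prof_Bonus, Charisma)
    else
      (Strength + Prof_Bonus, Dexterity, Constitution + Prof_Bonus, Intelligence, Wisdom, Charisma)
  [("Strength", Strength), ("Dexterity", Dexterity), ("Constitution", Constitution),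
   ("Intelligence", Intelligence), ("Wisdom", Wisdom), ("Charisma", Charisma)]

-- ===== PORT B =====
-- priority of each class name (dict _PRIO, in insertion order)
def csrPrio : List (String × Nat) :=
  [("Barbarian", 0), ("Fighter", 0),
   ("Bard", 1), ("Rogue", 1),
   ("Cleric", 2), ("Paladin", 2), ("Warlock", 2),
   ("Druid", 3), ("Wizard", 3),
   ("Monk", 4), ("Ranger", 4)]

-- the save pair of each priority group (list _SAVES)
def csrSaves : List (String × String) :=
  [("Strength", "Dexterity"), ("Dexterity", "Charisma"),
   ("Wisdom", "Charisma"), ("Intelligence", "Wisdom"),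
   ("Dexterity", "Wisdom"), ("Strength", "Constitution")]

-- min((g for n, g in _PRIO.items() if n in Class), default=5)
def csrIdx (Class : String) : Nat :=
  ((csrPrio.filterMap (fun p => if PySem.Str.isIn p.1 Class then some p.2 else none)).min?).getD 5

def Create_Saving_Rolls_alt (Strength : Int) (Dexterity : Int) (Constitution : Int) (Intelligence : Int) (Wisdom : Int) (Charisma : Int) (Class : String) (Prof_Bonus : Int) : List (String × Int) :=
  let saves := csrSaves.getD (csrIdx Class) ("Strength", "Constitution")
  let base : List (String × Int) :=
    [("Strength", Strength), ("Dexterity", Dexterity),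
     ("Constitution", Constitution), ("Intelligence", Intelligence),
     ("Wisdom", Wisdom), ("Charisma", Charisma)]
  base.map (fun kv => (kv.1, kv.2 + (if kv.1 = saves.1 ∨ kv.1 = saves.2 then Prof_Bonus else 0)))

-- ===== PRECONDITION & SPEC =====
def Spec_Create_Saving_Rolls (Strength : Int) (Dexterity : Int) (Constitution : Int) (Intelligence : Int) (Wisdom : Int) (Charisma : Int) (Class : String) (Prof_Bonus : Int) (out : List (String × Int)) : Prop := out = Create_Saving_Rolls_alt Strength Dexterity Constitution Intelligence Wisdom Charisma Class Prof_Bonus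
instance (Strength : Int) (Dexterity : Int) (Constitution : Int) (Intelligence : Int) (Wisdom : Int) (Charisma : Int) (Class : String) (Prof_Bonus : Int) (out : List (String × Int)) : Decidable (Spec_Create_Saving_Rolls Strength Dexterity Constitution Intelligence Wisdom Charisma Class Prof_Bonus out) := by unfold Spec_Create_Saving_Rolls; infer_instance

-- ===== CLAIM =====
def Claim_equal_Create_Saving_Rolls : Prop := ∀ (Strength : Int) (Dexterity : Int) (Constitution : Int) (Intelligence : Int) (Wisdom : Int) (Charisma : Int) (Class : String) (Prof_Bonus : Int), Dom_Create_Saving_Rolls Strength Dexterity Constitution Intelligence Wisdom Charisma Class Prof_Bonus → Spec_Create_Saving_Rolls Strength Dexterity Constitution Intelligence Wisdom Charisma Class Prof_Bonus (Create_Saving_Rolls Strength Dexterity Constitution Intelligence Wisdom Charisma Class Prof_Bonus)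

-- ===== LEMMAS AND PROOFS =====
-- Generic: min-with-default-5 over the priorities whose flag is set equals the
-- first-match chain over the grouped flags (checked over all 2^11 flag vectors).
theorem csrKey (x1 x2 x3 x4 x5 x6 x7 x8 x9 x10 x11 : Bool) :
    ((([(x1, 0), (x2, 0), (x3, 1), (x4, 1), (x5, 2), (x6, 2), (x7, 2),
        (x8, 3), (x9, 3), (x10, 4), (x11, 4)] : List (Bool × Nat)).filterMap
        (fun p => if p.1 then some p.2 else none)).min?).getD 5 =
      (if x1 || x2 then 0
       else if x3 || x4 then 1
       else if x5 || (x6 || x7) then 2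
       else if x8 || x9 then 3
       else if x10 || x11 then 4
       else 5) := by
  revert x1 x2 x3 x4 x5 x6 x7 x8 x9 x10 x11
  decide

-- B's index equals the first-match group index of A's chain.
theorem csrIdx_eq (Class : String) :
    csrIdx Class =
      (if anyIn ["Barbarian", "Fighter"] Class then 0
       else if anyIn ["Bard", "Rogue"] Class then 1
       else if anyIn ["Cleric", "Paladin", "Warlock"] Class then 2
       else if anyIn ["Druid", "Wizard"] Class then 3
       else if anyIn ["Monk", "Ranger"] Class then 4
       else 5) := by
  have h := csrKey (PySem.Str.isIn "Barbarian" Class) (PySem.Str.isIn "Fighter" Class)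
    (PySem.Str.isIn "Bard" Class) (PySem.Str.isIn "Rogue" Class)
    (PySem.Str.isIn "Cleric" Class) (PySem.Str.isIn "Paladin" Class)
    (PySem.Str.isIn "Warlock" Class) (PySem.Str.isIn "Druid" Class)
    (PySem.Str.isIn "Wizard" Class) (PySem.Str.isIn "Monk" Class)
    (PySem.Str.isIn "Ranger" Class)
  have e : (csrPrio.filterMap (fun p => if PySem.Str.isIn p.1 Class then some p.2 else none)) =
      (([(PySem.Str.isIn "Barbarian" Class, 0), (PySem.Str.isIn "Fighter" Class, 0),
         (PySem.Str.isIn "Bard" Class, 1), (PySem.Str.isIn "Rogue" Class, 1),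
         (PySem.Str.isIn "Cleric" Class, 2), (PySem.Str.isIn "Paladin" Class, 2),
         (PySem.Str.isIn "Warlock" Class, 2), (PySem.Str.isIn "Druid" Class, 3),
         (PySem.Str.isIn "Wizard" Class, 3), (PySem.Str.isIn "Monk" Class, 4),
         (PySem.Str.isIn "Ranger" Class, 4)] : List (Bool × Nat)).filterMap
         (fun p => if p.1 then some p.2 else none)) := by
    simp only [csrPrio, List.filterMap_cons, List.filterMap_nil]
  unfold csrIdx
  rw [e]
  simpa only [anyIn, List.any_cons, List.any_nil, Bool.or_false] using h

-- ===== VERDICT =====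
set_option maxHeartbeats 1000000 in
theorem Create_Saving_Rolls_spec : Claim_equal_Create_Saving_Rolls := by
  intro S D C I W Ch Class P _
  unfold Spec_Create_Saving_Rolls Create_Saving_Rolls Create_Saving_Rolls_alt
  rw [csrIdx_eq]
  rcases Bool.eq_false_or_eq_true (anyIn ["Barbarian", "Fighter"] Class) with h1 | h1 <;>
  rcases Bool.eq_false_or_eq_true (anyIn ["Bard", "Rogue"] Class) with h2 | h2 <;>
  rcases Bool.eq_false_or_eq_true (anyIn ["Cleric", "Paladin", "Warlock"] Class) with h3 | h3 <;>
  rcases Bool.eq_false_or_eq_true (anyIn ["Druid", "Wizard"] Class) with h4 | h4 <;>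
  rcases Bool.eq_false_or_eq_true (anyIn ["Monk", "Ranger"] Class) with h5 | h5 <;>
  simp [h1, h2, h3, h4, h5, csrSaves]
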